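-- pv_equiv track=rewrite | github.com/groverdivas/Transition_based_Dependency_Parser | TransitionDependencyParser.py | right_arc
-- ===== SOURCE A (Python) =====
-- from collections import defaultdict
--
-- def right_arc(all, un_tag):
--
--     total_r = []
--     for g in all:
--
--         temp = defaultdict(list)
--         for h in g:
--
--             r = g[h][::2]
--             s = g[h][1::2]
--             ##collects only those which have relation index greater than there
--             ##index number in the sentence
--             ##appends them in a list
--             for b in range(len(r)):
--
--                 if r[b] < s[b] and r[b] != 0:
--                     temp[h].append(r[b])
--
--         total_r.append(dict(temp)) # ITS A LIST
--
--     total_sr_r = {}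
--
--     for g in un_tag:
--
--         tag_r = []
--         for h in all:
--
--             if g in h:
--                 tag_r.append(list(h[g][1::2]))
--             else:
--                 tag_r.append(["null"])
--
--         total_sr_r[g] = tag_r # ITS A DICTIONARY
--
--     right = {}
--     for tup in un_tag:
--
--         c = 0
--         temp = {}
--         for sentence in total_r:
--
--             if tup in sentence:
--                 r = sentence[tup]
--                 for tags in total_sr_r:
--
--                     h = total_sr_r[tags]
--                     b = h[c]
--                     for g in range(len(r)):
--
--                         if r[g] in b or r[g] == b:
--                             if tags in temp:
--                                 temp[tags] = temp[tags] + 1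
--                             else:
--                                 temp[tags] = 1
--             c += 1
--
--         right[tup] = temp
--
--     return right
-- ===== SOURCE B (Python) =====
-- from collections import Counter
--
-- def right_arc(all, un_tag):
--     # Inverted index per graph (s-value -> tag keys), Counter per key, merge sorted by tag rank.
--     order = list(dict.fromkeys(un_tag))
--     rank = {t: i for i, t in enumerate(order)}
--     right = {t: {} for t in order}
--     for g in all:
--         inv = {}
--         for h in g:
--             if h in rank:
--                 for v in dict.fromkeys(g[h][1::2]):
--                     inv.setdefault(v, []).append(h)
--         for h in g:
--             if h not in rank:
--                 continue
--             vals = g[h]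
--             keep = [a for a, b in zip(vals[::2], vals[1::2]) if a < b and a != 0]
--             local = Counter(t for a in keep for t in inv.get(a, ()))
--             acc = right[h]
--             for tags in sorted(local, key=rank.get):
--                 acc[tags] = acc.get(tags, 0) + local[tags]
--     return right
-- ===== Notes on version B (the rewrite author's own statement) =====
-- stated objective: faster
-- what changed: B replaces A's per-tag re-scan of the corpus (tup-outer, sentence-inner, tags-inner, with an innermost list-membership scan) by one pass over the corpus that builds, per graph, an inverted index from s-value to tag keys, counts matches per key with a Counter fed through that index, and merges the per-graph counts into right[tup] sorted by tag rank.
import Mathlib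
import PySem

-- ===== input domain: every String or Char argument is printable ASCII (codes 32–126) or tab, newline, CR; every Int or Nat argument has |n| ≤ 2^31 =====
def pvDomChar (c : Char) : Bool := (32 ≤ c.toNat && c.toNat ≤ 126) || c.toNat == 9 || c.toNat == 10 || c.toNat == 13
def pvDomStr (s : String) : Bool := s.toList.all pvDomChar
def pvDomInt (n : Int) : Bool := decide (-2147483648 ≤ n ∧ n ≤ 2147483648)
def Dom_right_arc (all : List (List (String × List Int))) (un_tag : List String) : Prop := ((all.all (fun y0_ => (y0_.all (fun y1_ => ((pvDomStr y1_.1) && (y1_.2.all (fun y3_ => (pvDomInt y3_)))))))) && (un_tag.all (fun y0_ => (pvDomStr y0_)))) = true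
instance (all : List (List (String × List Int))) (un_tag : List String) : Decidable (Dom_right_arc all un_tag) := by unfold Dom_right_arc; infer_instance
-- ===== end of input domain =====

-- One honest line: B replaces A's per-tag re-scan of the corpus by one pass that builds, per graph,
-- an inverted index (s-value -> tag keys), counts matches per key with a Counter and merges the
-- counts sorted by tag rank; objective: faster (no per-tag corpus re-scan, no inner list scans).

-- ===== PORT A =====
-- g[h][::2] and g[h][1::2] (extended slices, step 2)
def pvHalfEven (vs : List Int) : List Int := (PySem.List.slice? vs none none 2).getD []
def pvHalfOdd (vs : List Int) : List Int := (PySem.List.slice? vs (some 1) none 2).getD []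

-- first loop of A, per graph: temp = defaultdict(list); keys appear only when something is appended
def pvTempA (g : List (String × List Int)) : PySem.Dict String (List Int) :=
  g.foldl (fun temp hv =>
    let r := pvHalfEven hv.2
    let s := pvHalfOdd hv.2
    (PySem.List.pyRange 0 (PySem.List.len r)).foldl (fun temp b =>
      if PySem.List.pyGetD r b 0 < PySem.List.pyGetD s b 0 ∧ PySem.List.pyGetD r b 0 ≠ 0 then
        temp.modify hv.1 [] (fun l => l ++ [PySem.List.pyGetD r b 0])
      else temp) temp) PySem.Dict.empty

-- second loop of A, per tag: tag_r (["null"] sentinel ported as none — an int is never in ["null"] nor equal to a list)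
def pvTagR (all : List (List (String × List Int))) (g : String) : List (Option (List Int)) :=
  all.foldl (fun tag_r h =>
    if (PySem.Dict.ofList h).contains g then
      tag_r ++ [some (pvHalfOdd ((PySem.Dict.ofList h).getD g []))]
    else
      tag_r ++ [none]) []

-- third loop of A, per sentence (ct = (c, temp)); 'r[g] in b or r[g] == b' — membership only, none/["null"] never matches
def pvStep3 (srItems : List (String × List (Option (List Int)))) (tup : String)
    (ct : Int × PySem.Dict String Int) (sentence : PySem.Dict String (List Int)) :
    Int × PySem.Dict String Int :=
  let temp :=
    if sentence.contains tup then
      let r := sentence.getD tup []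
      srItems.foldl (fun temp th =>
        let b := PySem.List.pyGetD th.2 ct.1 none
        (PySem.List.pyRange 0 (PySem.List.len r)).foldl (fun temp gi =>
          if PySem.List.pyGetD r gi 0 ∈ b.getD [] then
            if temp.contains th.1 then temp.insert th.1 (temp.getD th.1 0 + 1)
            else temp.insert th.1 1
          else temp) temp) ct.2
    else ct.2
  (ct.1 + 1, temp)

def right_arc (all : List (List (String × List Int))) (un_tag : List String) : List (String × List (String × Int)) :=
  let total_r : List (PySem.Dict String (List Int)) :=
    all.foldl (fun total_r g => total_r ++ [pvTempA g]) []
  let total_sr_r : PySem.Dict String (List (Option (List Int))) :=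
    un_tag.foldl (fun d g => d.insert g (pvTagR all g)) PySem.Dict.empty
  let right : PySem.Dict String (PySem.Dict String Int) :=
    un_tag.foldl (fun right tup =>
      right.insert tup (total_r.foldl (pvStep3 total_sr_r.items tup) (0, PySem.Dict.empty)).2) PySem.Dict.empty
  right.items.map (fun p => (p.1, p.2.items))

-- ===== PORT B =====
-- keep = [a for a, b in zip(vals[::2], vals[1::2]) if a < b and a != 0]
def pvKeep (vs : List Int) : List Int :=
  (((pvHalfEven vs).zip (pvHalfOdd vs)).filter (fun p => p.1 < p.2 && p.1 != 0)).map Prod.fst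

-- rank = {t: i for i, t in enumerate(order)}
def pvRank (order : List String) : PySem.Dict String Int :=
  (PySem.List.enumerate order 0).foldl (fun d p => d.insert p.2 p.1) PySem.Dict.empty

-- inv = {}; for h in g: if h in rank: for v in dict.fromkeys(g[h][1::2]): inv.setdefault(v, []).append(h)
def pvInv (rank : PySem.Dict String Int) (g : List (String × List Int)) : PySem.Dict Int (List String) :=
  g.foldl (fun inv hv =>
    if rank.contains hv.1 then
      (PySem.List.dedup (pvHalfOdd hv.2)).foldl (fun inv v => inv.modify v [] (fun l => l ++ [hv.1])) inv
    else inv) PySem.Dict.empty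

-- local = Counter(t for a in keep for t in inv.get(a, ()))
def pvLocal (inv : PySem.Dict Int (List String)) (keep : List Int) : PySem.Dict String Int :=
  PySem.Dict.counter (keep.flatMap (fun a => inv.getD a []))

-- for tags in sorted(local, key=rank.get): acc[tags] = acc.get(tags, 0) + local[tags]
-- (every key of local lies in rank, so rank.get never returns None; ported as rank.getD _ 0)
def pvMergeAcc (rank : PySem.Dict String Int) (lc : PySem.Dict String Int)
    (acc : PySem.Dict String Int) : PySem.Dict String Int :=
  (PySem.List.sorted lc.keys (fun t => rank.getD t 0)).foldl
    (fun acc tags => acc.insert tags (acc.getD tags 0 + lc.getD tags 0)) acc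

-- body of B's second per-graph loop ('acc = right[h]' + in-place update ported as modify; h is
-- always a key of right since h in rank)
def pvPairStep (rank : PySem.Dict String Int) (inv : PySem.Dict Int (List String))
    (right : PySem.Dict String (PySem.Dict String Int)) (hv : String × List Int) :
    PySem.Dict String (PySem.Dict String Int) :=
  if rank.contains hv.1 then
    right.modify hv.1 PySem.Dict.empty (pvMergeAcc rank (pvLocal inv (pvKeep hv.2)))
  else right

def pvGraphStep (rank : PySem.Dict String Int)
    (right : PySem.Dict String (PySem.Dict String Int)) (g : List (String × List Int)) :
    PySem.Dict String (PySem.Dict String Int) :=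
  g.foldl (pvPairStep rank (pvInv rank g)) right

def right_arc_alt (all : List (List (String × List Int))) (un_tag : List String) : List (String × List (String × Int)) :=
  let order : List String := PySem.List.dedup un_tag
  let rank := pvRank order
  let right0 : PySem.Dict String (PySem.Dict String Int) :=
    order.foldl (fun d t => d.insert t PySem.Dict.empty) PySem.Dict.empty
  let right := all.foldl (pvGraphStep rank) right0
  right.items.map (fun p => (p.1, p.2.items))

-- ===== PRECONDITION & SPEC =====
-- Pre_ excludes (a) graphs containing a value list of odd length, on which A raises IndexError
-- (the loop reads s[b] = vals[1::2][b] one past its end), and (b) assoc lists with duplicate keys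
-- inside a graph, which do not encode a Python dict (the dict correspondence is ambiguous there).
def Pre_right_arc (all : List (List (String × List Int))) (un_tag : List String) : Prop :=
  ∀ g ∈ all, (g.map Prod.fst).Nodup ∧ ∀ hv ∈ g, hv.2.length % 2 = 0
instance (all : List (List (String × List Int))) (un_tag : List String) : Decidable (Pre_right_arc all un_tag) := by unfold Pre_right_arc; infer_instance

def pvWitness_right_arc : (List (List (String × List Int))) × List String :=
  ([[("a", [1, 2]), ("b", [3, 1, 2, 4])], [("a", [2, 3])]], ["a", "b"])

def Spec_right_arc (all : List (List (String × List Int))) (un_tag : List String) (out : List (String × List (String × Int))) : Prop := out = right_arc_alt all un_tag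
instance (all : List (List (String × List Int))) (un_tag : List String) (out : List (String × List (String × Int))) : Decidable (Spec_right_arc all un_tag out) := by unfold Spec_right_arc; infer_instance

-- ===== CLAIM (what is proved, stated in full; the proofs are below) =====
def Claim_equal_right_arc : Prop := ∀ (all : List (List (String × List Int))) (un_tag : List String), Dom_right_arc all un_tag → Pre_right_arc all un_tag → Spec_right_arc all un_tag (right_arc all un_tag)


-- ===== LEMMAS AND PROOFS =====

-- a graph that encodes a Python dict with all value lists of even length
def GraphOK (g : List (String × List Int)) : Prop :=
  (g.map Prod.fst).Nodup ∧ ∀ hv ∈ g, hv.2.length % 2 = 0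

-- proof-side per-graph tables: the filtered keep-lists (only nonempty) and the s-value set per key
def pvFilt (g : List (String × List Int)) : PySem.Dict String (List Int) :=
  g.foldl (fun filt hv =>
    let keep := pvKeep hv.2
    if keep.isEmpty then filt else filt.insert hv.1 keep) PySem.Dict.empty

def pvSset (g : List (String × List Int)) : PySem.Dict String (PySem.Set Int) :=
  g.foldl (fun d hv => d.insert hv.1 (PySem.Set.ofList (pvHalfOdd hv.2))) PySem.Dict.empty

-- the common middle: the per-graph, per-tup accumulation both programs perform
def pvVG (order : List String) (g : List (String × List Int)) (tup : String)
    (acc : PySem.Dict String Int) : PySem.Dict String Int :=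
  match (pvFilt g).get? tup with
  | none => acc
  | some keep =>
    order.foldl (fun acc tags =>
      if (pvSset g).contains tags then
        let n : Int := keep.countP (fun a => decide (a ∈ (pvSset g).getD tags []))
        if n ≠ 0 then acc.insert tags (acc.getD tags 0 + n) else acc
      else acc) acc

-- ---- generic loop lemmas ----
theorem pv_foldl_inv {α β : Type} (l : List α) (f : β → α → β) (P : β → Prop)
    (h : ∀ acc x, x ∈ l → P acc → P (f acc x)) (init : β) (h0 : P init) : P (l.foldl f init) := by
  induction l generalizing init with
  | nil => exact h0
  | cons x t ih =>
    exact ih (fun acc y hy => h acc y (List.mem_cons_of_mem _ hy)) _ (h init x (List.mem_cons_self) h0)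

theorem length_filterMap_of_isSome {α β : Type} {l : List α} {f : α → Option β}
    (h : ∀ k ∈ l, (f k).isSome) : (l.filterMap f).length = l.length := by
  induction l with
  | nil => rfl
  | cons x t ih =>
    obtain ⟨b, hb⟩ := Option.isSome_iff_exists.mp (h x (List.mem_cons_self))
    simp [hb, ih (fun k hk => h k (List.mem_cons_of_mem _ hk))]

theorem pv_len_halfEven (vs : List Int) : (pvHalfEven vs).length = (vs.length + 1) / 2 := by
  unfold pvHalfEven PySem.List.slice?
  simp only [PySem.List.sliceIndices]
  norm_num
  rw [length_filterMap_of_isSome, List.length_range]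
  · split_ifs with h <;> omega
  · intro k hk
    rw [List.mem_range] at hk
    have hlt : (2 * (k:Int)).toNat < vs.length := by split_ifs at hk <;> omega
    simp [List.getElem?_eq_getElem hlt]

theorem pv_len_halfOdd (vs : List Int) : (pvHalfOdd vs).length = vs.length / 2 := by
  unfold pvHalfOdd PySem.List.slice?
  simp only [PySem.List.sliceIndices]
  norm_num
  rw [length_filterMap_of_isSome, List.length_range]
  · split_ifs with h <;> omega
  · intro k hk
    rw [List.mem_range] at hk
    have hlt : (min 1 (vs.length:Int) + 2 * (k:Int)).toNat < vs.length := by split_ifs at hk <;> omega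
    simp [List.getElem?_eq_getElem hlt]

theorem pv_len_half_eq {vs : List Int} (h : vs.length % 2 = 0) :
    (pvHalfEven vs).length = (pvHalfOdd vs).length := by
  rw [pv_len_halfEven, pv_len_halfOdd]; omega

theorem pv_foldl_idx {β : Type} (r : List Int) (F : β → Int → β) (init : β) :
    (PySem.List.pyRange 0 (PySem.List.len r)).foldl (fun acc j => F acc (PySem.List.pyGetD r j 0)) init
      = r.foldl F init := by
  conv_rhs => rw [← PySem.List.map_pyGetD_pyRange_zero r 0]
  rw [List.foldl_map]

theorem pv_foldl_range_zip {β : Type} : ∀ (r s : List Int) (F : β → Int → Int → β) (init : β),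
    r.length = s.length →
    (List.range r.length).foldl (fun acc k => F acc (r.getD k 0) (s.getD k 0)) init
      = (r.zip s).foldl (fun acc p => F acc p.1 p.2) init := by
  intro r
  induction r with
  | nil => intro s F init h; simp
  | cons x t ih =>
    intro s F init h
    cases s with
    | nil => simp at h
    | cons y u =>
      simp only [List.length_cons, List.range_succ_eq_map, List.foldl_cons, List.zip_cons_cons,
        List.foldl_map, List.getD_cons_zero, List.getD_cons_succ]
      exact ih u _ _ (by simpa using h)

theorem pv_foldl_idx_pair {β : Type} (r s : List Int) (F : β → Int → Int → β) (init : β)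
    (h : r.length = s.length) :
    (PySem.List.pyRange 0 (PySem.List.len r)).foldl
        (fun acc j => F acc (PySem.List.pyGetD r j 0) (PySem.List.pyGetD s j 0)) init
      = (r.zip s).foldl (fun acc p => F acc p.1 p.2) init := by
  rw [PySem.List.pyRange_one]
  have h1 : ((PySem.List.len r) - 0).toNat = r.length := by simp [PySem.List.len_eq]
  rw [h1, List.foldl_map]
  simp only [zero_add, PySem.List.pyGetD_natCast]
  exact pv_foldl_range_zip r s F init h

theorem pv_foldl_modify_append : ∀ (l : List Int) (k : String) (d : PySem.Dict String (List Int)),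
    l.foldl (fun d x => d.modify k [] (fun v => v ++ [x])) d
      = if l.isEmpty then d else d.insert k (d.getD k [] ++ l) := by
  intro l
  induction l with
  | nil => intro k d; simp
  | cons x t ih =>
    intro k d
    simp only [List.foldl_cons, List.isEmpty_cons, if_neg, Bool.false_eq_true, not_false_iff]
    rw [ih]
    simp only [PySem.Dict.modify]
    by_cases ht : t.isEmpty
    · simp only [ht, if_pos]
      rw [List.isEmpty_iff.mp ht]
    · simp only [ht, if_neg, Bool.false_eq_true, not_false_iff]
      rw [PySem.Dict.getD_insert_self, PySem.Dict.insert_insert_self]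
      simp

theorem pv_count_fold : ∀ (l : List Int) (P : Int → Prop) [DecidablePred P] (k : String)
    (temp : PySem.Dict String Int),
    l.foldl (fun temp x =>
        if P x then
          if temp.contains k then temp.insert k (temp.getD k 0 + 1) else temp.insert k 1
        else temp) temp
      = if l.countP (fun x => decide (P x)) = 0 then temp
        else temp.insert k (temp.getD k 0 + (l.countP (fun x => decide (P x)) : Int)) := by
  intro l
  induction l with
  | nil => intro P _ k temp; simp
  | cons x t ih =>
    intro P _ k temp
    rw [List.foldl_cons]
    have h1 : List.countP (fun x => decide (P x)) (x :: t)
        = List.countP (fun x => decide (P x)) t + (if P x then 1 else 0) := by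
      rw [List.countP_cons]
      congr 1
      split_ifs <;> simp_all
    by_cases hx : P x
    · have hincr : (if temp.contains k then temp.insert k (temp.getD k 0 + 1) else temp.insert k 1)
          = temp.insert k (temp.getD k 0 + 1) := by
        by_cases hc : temp.contains k
        · rw [if_pos hc]
        · rw [if_neg hc, PySem.Dict.getD_of_not_contains _ _ (by revert hc; cases h : temp.contains k <;> simp)]
          norm_num
      rw [if_pos hx, hincr, ih, h1, if_pos hx]
      have hne : List.countP (fun x => decide (P x)) t + 1 ≠ 0 := by omega
      rw [if_neg hne]
      split_ifs with h0
      · simp [h0]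
      · rw [PySem.Dict.getD_insert_self, PySem.Dict.insert_insert_self]
        congr 1
        push_cast
        ring
    · rw [if_neg hx, ih, h1, if_neg hx]
      simp

theorem pv_getD_foldl_insertF {ν : Type} : ∀ (l : List String) (F : String → ν) (d : PySem.Dict String ν)
    (k : String) (dflt : ν),
    (l.foldl (fun d x => d.insert x (F x)) d).getD k dflt
      = if k ∈ l then F k else d.getD k dflt := by
  intro l
  induction l with
  | nil => intro F d k dflt; simp
  | cons x t ih =>
    intro F d k dflt
    simp only [List.foldl_cons]
    rw [ih]
    by_cases hm : k ∈ t
    · simp [hm]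
    · by_cases hk : k = x
      · simp [hk, PySem.Dict.getD_insert_self]
      · simp [hm, hk, PySem.Dict.getD_insert _ _ _ _ _]

theorem pv_keys_foldl_insertF {ν : Type} (l : List String) (F : String → ν) :
    (l.foldl (fun d x => d.insert x (F x)) (PySem.Dict.empty : PySem.Dict String ν)).keys
      = PySem.Set.ofList l := by
  rw [PySem.Dict.keys_foldl_insert (f := fun _ x => F x), PySem.Dict.keys_empty,
    PySem.Set.update_nil_left]

theorem pv_insertF_items {ν : Type} (l : List String) (F : String → ν) (dflt : ν) :
    (l.foldl (fun d x => d.insert x (F x)) (PySem.Dict.empty : PySem.Dict String ν)).items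
      = (PySem.Set.ofList l).map (fun k => (k, F k)) := by
  rw [PySem.Dict.items_eq_map_keys _ (by rw [pv_keys_foldl_insertF]; exact PySem.Set.nodup_ofList l) dflt,
    pv_keys_foldl_insertF]
  apply List.map_congr_left
  intro k hk
  rw [pv_getD_foldl_insertF, if_pos ((PySem.Set.mem_ofList l k).mp hk)]

-- ---- raw assoc lists as Python dicts ----
theorem pv_items_ofList (g : List (String × List Int)) (h : (g.map Prod.fst).Nodup) :
    (PySem.Dict.ofList g).items = g := by
  show (PySem.Dict.update PySem.Dict.empty g).items = g
  rw [show PySem.Dict.update (PySem.Dict.empty : PySem.Dict String (List Int)) g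
      = g.foldl (fun d (p : String × List Int) => d.insert p.1 p.2) PySem.Dict.empty from rfl]
  rw [PySem.Dict.items_foldl_insert_fresh g Prod.fst Prod.snd _ (fun a _ => by simp) h]
  show (PySem.Dict.empty : PySem.Dict String (List Int)).items ++ _ = _
  rw [show (PySem.Dict.empty : PySem.Dict String (List Int)).items = [] from rfl]
  simp

theorem pv_keys_pairF {ν : Type} (g : List (String × List Int)) (W : String × List Int → ν) :
    (g.foldl (fun d hv => d.insert hv.1 (W hv)) (PySem.Dict.empty : PySem.Dict String ν)).keys
      = PySem.Set.ofList (g.map Prod.fst) := by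
  rw [PySem.Dict.keys_foldl_insert_key g Prod.fst (fun d hv => W hv), PySem.Dict.keys_empty,
    PySem.Set.update_nil_left]

theorem pv_getD_pairF_notmem {ν : Type} : ∀ (g : List (String × List Int)) (W : String × List Int → ν)
    (d : PySem.Dict String ν) (k : String) (dflt : ν), k ∉ g.map Prod.fst →
    (g.foldl (fun d hv => d.insert hv.1 (W hv)) d).getD k dflt = d.getD k dflt := by
  intro g
  induction g with
  | nil => intro W d k dflt _; rfl
  | cons hv t ih =>
    intro W d k dflt hk
    simp only [List.map_cons, List.mem_cons, not_or] at hk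
    simp only [List.foldl_cons]
    rw [ih _ _ _ _ hk.2, PySem.Dict.getD_insert, if_neg hk.1]

theorem pv_getD_pairF {ν : Type} : ∀ (g : List (String × List Int)) (W : String × List Int → ν)
    (d : PySem.Dict String ν) (dflt : ν), (g.map Prod.fst).Nodup →
    ∀ hv ∈ g,
    (g.foldl (fun d hv => d.insert hv.1 (W hv)) d).getD hv.1 dflt = W hv := by
  intro g
  induction g with
  | nil => intro _ _ _ _ hv h; simp at h
  | cons hw t ih =>
    intro W d dflt hnd hv hm
    simp only [List.map_cons, List.nodup_cons] at hnd
    rcases List.mem_cons.mp hm with h | h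
    · subst h
      simp only [List.foldl_cons]
      rw [pv_getD_pairF_notmem t W _ _ _ hnd.1, PySem.Dict.getD_insert_self]
    · simp only [List.foldl_cons]
      exact ih W _ dflt hnd.2 hv h

-- ---- phase 1 of A: temp equals the filtered keep-table ----
theorem pv_stepA_pair (hv : String × List Int) (d : PySem.Dict String (List Int))
    (he : hv.2.length % 2 = 0) :
    (PySem.List.pyRange 0 (PySem.List.len (pvHalfEven hv.2))).foldl (fun temp b =>
      if PySem.List.pyGetD (pvHalfEven hv.2) b 0 < PySem.List.pyGetD (pvHalfOdd hv.2) b 0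
          ∧ PySem.List.pyGetD (pvHalfEven hv.2) b 0 ≠ 0 then
        temp.modify hv.1 [] (fun l => l ++ [PySem.List.pyGetD (pvHalfEven hv.2) b 0])
      else temp) d
    = if (pvKeep hv.2).isEmpty then d else d.insert hv.1 (d.getD hv.1 [] ++ pvKeep hv.2) := by
  rw [pv_foldl_idx_pair (pvHalfEven hv.2) (pvHalfOdd hv.2)
      (fun acc x y => if x < y ∧ x ≠ 0 then acc.modify hv.1 [] (fun l => l ++ [x]) else acc)
      d (pv_len_half_eq he)]
  rw [PySem.List.foldl_ite_eq_foldl_filter (fun p : Int × Int => p.1 < p.2 ∧ p.1 ≠ 0)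
      (fun acc p => PySem.Dict.modify acc hv.1 [] (fun l => l ++ [p.1]))]
  rw [show (List.filter (fun x : Int × Int => decide (x.1 < x.2 ∧ x.1 ≠ 0))
        ((pvHalfEven hv.2).zip (pvHalfOdd hv.2)))
      = (((pvHalfEven hv.2).zip (pvHalfOdd hv.2)).filter (fun p => p.1 < p.2 && p.1 != 0)) from by
    apply List.filter_congr; intro p _; by_cases h : p.1 = 0 <;> simp [h, bne]]
  rw [← List.foldl_map (f := Prod.fst) (g := fun (acc : PySem.Dict String (List Int)) (x : Int) => PySem.Dict.modify acc hv.1 [] (fun l => l ++ [x]))]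
  rw [pv_foldl_modify_append]
  rfl

theorem pv_tempA_eq_filt_aux : ∀ (g : List (String × List Int)) (d : PySem.Dict String (List Int)),
    (g.map Prod.fst).Nodup → (∀ hv ∈ g, hv.2.length % 2 = 0) →
    (∀ hv ∈ g, d.contains hv.1 = false) →
    g.foldl (fun temp hv =>
      let r := pvHalfEven hv.2
      let s := pvHalfOdd hv.2
      (PySem.List.pyRange 0 (PySem.List.len r)).foldl (fun temp b =>
        if PySem.List.pyGetD r b 0 < PySem.List.pyGetD s b 0 ∧ PySem.List.pyGetD r b 0 ≠ 0 then
          temp.modify hv.1 [] (fun l => l ++ [PySem.List.pyGetD r b 0])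
        else temp) temp) d
    = g.foldl (fun filt hv =>
        let keep := pvKeep hv.2
        if keep.isEmpty then filt else filt.insert hv.1 keep) d := by
  intro g
  induction g with
  | nil => intro d _ _ _; rfl
  | cons hv t ih =>
    intro d hnd he hc
    simp only [List.map_cons, List.nodup_cons] at hnd
    simp only [List.foldl_cons]
    rw [pv_stepA_pair hv d (he hv (List.mem_cons_self))]
    have hfresh := hc hv (List.mem_cons_self)
    have hge : d.getD hv.1 [] = [] := PySem.Dict.getD_of_not_contains _ _ hfresh
    rw [hge]
    simp only [List.nil_append]
    apply ih _ hnd.2 (fun hw hm => he hw (List.mem_cons_of_mem _ hm))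
    intro hw hm
    by_cases hk : (pvKeep hv.2).isEmpty
    · simp only [hk, if_pos]
      exact hc hw (List.mem_cons_of_mem _ hm)
    · simp only [hk, if_neg, Bool.false_eq_true, not_false_iff]
      rw [PySem.Dict.contains_insert]
      have : hw.1 ≠ hv.1 := by
        intro hh
        exact hnd.1 (hh ▸ (List.mem_map_of_mem hm))
      simp [this, hc hw (List.mem_cons_of_mem _ hm)]

theorem pv_tempA_eq_filt (g : List (String × List Int)) (h : GraphOK g) : pvTempA g = pvFilt g := by
  exact pv_tempA_eq_filt_aux g PySem.Dict.empty h.1 h.2 (fun hv _ => by simp)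

-- ---- phase 2 of A ----
theorem pv_tagR_eq_map (all : List (List (String × List Int))) (g : String) :
    pvTagR all g = all.map (fun h =>
      if (PySem.Dict.ofList h).contains g then some (pvHalfOdd ((PySem.Dict.ofList h).getD g []))
      else none) := by
  unfold pvTagR
  rw [PySem.List.foldl_congr_mem _ _ (fun tag_r h =>
    tag_r ++ [if (PySem.Dict.ofList h).contains g then some (pvHalfOdd ((PySem.Dict.ofList h).getD g [])) else none])
    _ (fun acc x _ => by split_ifs with h <;> simp [h])]
  rw [PySem.List.foldl_append_singleton_eq_map]
  simp

-- ---- per-sentence core of A equals pvVG ----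
theorem pv_ofList_contains (g : List (String × List Int)) (hnd : (g.map Prod.fst).Nodup) (k : String) :
    (PySem.Dict.ofList g).contains k = true ↔ k ∈ g.map Prod.fst := by
  rw [PySem.Dict.contains_iff_mem_keys]
  have : (PySem.Dict.ofList g).keys = g.map Prod.fst := by
    show (PySem.Dict.ofList g).items.map Prod.fst = g.map Prod.fst
    rw [pv_items_ofList g hnd]
  rw [this]

theorem pv_sset_contains (g : List (String × List Int)) (k : String) :
    (pvSset g).contains k = true ↔ k ∈ g.map Prod.fst := by
  rw [PySem.Dict.contains_iff_mem_keys]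
  unfold pvSset
  rw [pv_keys_pairF]
  exact PySem.Set.mem_ofList _ _

theorem pv_step3_eq_VG (order : List String) (pre suf : List (List (String × List Int)))
    (g : List (String × List Int)) (hg : GraphOK g) (tup : String)
    (temp : PySem.Dict String Int) :
    pvStep3 (order.map (fun t => (t, pvTagR (pre ++ g :: suf) t))) tup ((pre.length : Int), temp) (pvTempA g)
      = ((pre.length : Int) + 1, pvVG order g tup temp) := by
  have hb : ∀ tags, PySem.List.pyGetD (pvTagR (pre ++ g :: suf) tags) ((pre.length : Int)) none
      = (if (PySem.Dict.ofList g).contains tags then some (pvHalfOdd ((PySem.Dict.ofList g).getD tags []))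
         else none) := by
    intro tags
    rw [pv_tagR_eq_map, PySem.List.pyGetD_natCast, List.map_append, List.map_cons]
    rw [List.getD_eq_getElem?_getD, List.getElem?_append_right (by simp)]
    simp
  unfold pvStep3 pvVG
  rw [pv_tempA_eq_filt g hg]
  simp only []
  congr 1
  rw [PySem.Dict.contains_eq_isSome_get?]
  cases hq : (pvFilt g).get? tup with
  | none => simp
  | some keep =>
    simp only [Option.isSome_some, if_pos]
    have hr : (pvFilt g).getD tup [] = keep := by
      rw [PySem.Dict.getD_eq_get?_getD, hq]; rfl
    rw [hr, List.foldl_map]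
    apply PySem.List.foldl_congr_mem
    intro acc tags _
    simp only [hb]
    rw [pv_foldl_idx keep (fun temp x =>
      if x ∈ ((if (PySem.Dict.ofList g).contains tags then some (pvHalfOdd ((PySem.Dict.ofList g).getD tags []))
            else none)).getD [] then
        (if temp.contains tags then temp.insert tags (temp.getD tags 0 + 1) else temp.insert tags 1)
      else temp) acc]
    rw [pv_count_fold keep _ tags acc]
    by_cases hm : tags ∈ g.map Prod.fst
    · obtain ⟨hv, hvm, hveq⟩ := List.mem_map.mp hm
      have hcont : (PySem.Dict.ofList g).contains tags = true := (pv_ofList_contains g hg.1 tags).mpr hm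
      have hknd : (PySem.Dict.ofList g).keys.Nodup := by
        show ((PySem.Dict.ofList g).items.map Prod.fst).Nodup
        rw [pv_items_ofList g hg.1]; exact hg.1
      have hgetD : (PySem.Dict.ofList g).getD tags [] = hv.2 := by
        subst hveq
        exact PySem.Dict.getD_of_mem_items (PySem.Dict.ofList g)
          (by rw [pv_items_ofList g hg.1]; simpa using hvm) hknd []
      have hscont : (pvSset g).contains tags = true := (pv_sset_contains g tags).mpr hm
      have hsgetD : (pvSset g).getD tags [] = PySem.Set.ofList (pvHalfOdd hv.2) := by
        subst hveq
        exact pv_getD_pairF g _ PySem.Dict.empty _ hg.1 hv hvm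
      rw [if_pos hcont, hgetD, if_pos hscont, hsgetD]
      have hcnt : keep.countP (fun x => decide (x ∈ PySem.Set.ofList (pvHalfOdd hv.2)))
          = keep.countP (fun x => decide (x ∈ pvHalfOdd hv.2)) := by
        apply List.countP_congr
        intro x _
        simp [PySem.Set.mem_ofList]
      simp only [Option.getD_some, hcnt]
      split_ifs with h0 h1 h1 <;> first | rfl | (exfalso; simp_all)
    · have hcont : (PySem.Dict.ofList g).contains tags = false := by
        cases h : (PySem.Dict.ofList g).contains tags
        · rfl
        · exact absurd ((pv_ofList_contains g hg.1 tags).mp h) hm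
      have hscont : (pvSset g).contains tags = false := by
        cases h : (pvSset g).contains tags
        · rfl
        · exact absurd ((pv_sset_contains g tags).mp h) hm
      rw [hcont, hscont]
      simp

theorem pv_threadA (order : List String) (all : List (List (String × List Int))) (tup : String) :
    ∀ (suf pre : List (List (String × List Int))) (temp : PySem.Dict String Int),
      all = pre ++ suf → (∀ g ∈ all, GraphOK g) →
      ((suf.map pvTempA).foldl (pvStep3 (order.map (fun t => (t, pvTagR all t))) tup)
          ((pre.length : Int), temp)).2
        = suf.foldl (fun temp g => pvVG order g tup temp) temp := by
  intro suf
  induction suf with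
  | nil => intro pre temp _ _; rfl
  | cons g rest ih =>
    intro pre temp hall hok
    subst hall
    simp only [List.map_cons, List.foldl_cons]
    rw [pv_step3_eq_VG order pre rest g (hok g (by simp)) tup temp]
    have h2 : ((pre.length : Int) + 1) = (((pre ++ [g]).length : Int)) := by simp
    rw [h2]
    exact ih (pre ++ [g]) _ (by simp) hok

-- ---- B: the rank dictionary ----
theorem pv_rank_keys (order : List String) : (pvRank order).keys = PySem.Set.ofList order := by
  unfold pvRank
  rw [PySem.Dict.keys_foldl_insert_key (PySem.List.enumerate order 0) Prod.snd (fun d p => p.1),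
    PySem.Dict.keys_empty, PySem.Set.update_nil_left, PySem.List.map_snd_enumerate]

theorem pv_rank_contains (order : List String) (t : String) :
    (pvRank order).contains t = true ↔ t ∈ order := by
  rw [PySem.Dict.contains_iff_mem_keys, pv_rank_keys, PySem.Set.mem_ofList]

theorem pv_getD_snd_notmem : ∀ (l : List (Int × String)) (d : PySem.Dict String Int) (t : String),
    t ∉ l.map Prod.snd → (l.foldl (fun d q => d.insert q.2 q.1) d).getD t 0 = d.getD t 0 := by
  intro l
  induction l with
  | nil => intro d t _; rfl
  | cons q rest ih =>
    intro d t ht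
    simp only [List.map_cons, List.mem_cons, not_or] at ht
    simp only [List.foldl_cons]
    rw [ih _ _ ht.2, PySem.Dict.getD_insert, if_neg ht.1]

theorem pv_getD_snd : ∀ (l : List (Int × String)) (d : PySem.Dict String Int),
    (l.map Prod.snd).Nodup → ∀ p ∈ l, (l.foldl (fun d q => d.insert q.2 q.1) d).getD p.2 0 = p.1 := by
  intro l
  induction l with
  | nil => intro _ _ p h; simp at h
  | cons q rest ih =>
    intro d hnd p hm
    simp only [List.map_cons, List.nodup_cons] at hnd
    rcases List.mem_cons.mp hm with h | h
    · subst h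
      simp only [List.foldl_cons]
      rw [pv_getD_snd_notmem rest _ _ hnd.1, PySem.Dict.getD_insert_self]
    · simp only [List.foldl_cons]
      exact ih _ hnd.2 p h

theorem pv_rank_getD (order : List String) (hnd : order.Nodup) (i : Nat) (h : i < order.length) :
    (pvRank order).getD order[i] 0 = (i : Int) := by
  have hp : ((0 : Int) + (i : Nat), order[i]) ∈ PySem.List.enumerate order 0 :=
    (PySem.List.mem_enumerate_iff order 0 _).mpr ⟨i, h, rfl⟩
  have := pv_getD_snd (PySem.List.enumerate order 0) PySem.Dict.empty
    (by rw [PySem.List.map_snd_enumerate]; exact hnd) _ hp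
  simpa [pvRank] using this

theorem pv_rank_pairwise (order : List String) (hnd : order.Nodup) :
    order.Pairwise (fun a b => (pvRank order).getD a 0 < (pvRank order).getD b 0) := by
  rw [List.pairwise_iff_getElem]
  intro i j hi hj hij
  rw [pv_rank_getD order hnd i hi, pv_rank_getD order hnd j hj]
  exact_mod_cast hij

-- ---- B: the inverted index ----
theorem pv_inv_inner : ∀ (vs : List Int) (d : PySem.Dict Int (List String)), vs.Nodup →
    ∀ (hkey : String) (a : Int),
    (vs.foldl (fun d v => d.modify v [] (fun l => l ++ [hkey])) d).getD a []
      = d.getD a [] ++ (if a ∈ vs then [hkey] else []) := by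
  intro vs
  induction vs with
  | nil => intro d _ hkey a; simp
  | cons v rest ih =>
    intro d hnd hkey a
    simp only [List.nodup_cons] at hnd
    simp only [List.foldl_cons]
    rw [ih _ hnd.2, PySem.Dict.getD_modify]
    by_cases hav : a = v
    · subst hav
      have : a ∉ rest := hnd.1
      simp [this]
    · simp [hav, List.mem_cons]

theorem pv_inv_getD_aux (rank : PySem.Dict String Int) (a : Int) :
    ∀ (g : List (String × List Int)) (d : PySem.Dict Int (List String)),
    (g.foldl (fun inv hv =>
        if rank.contains hv.1 then
          (PySem.List.dedup (pvHalfOdd hv.2)).foldl (fun inv v => inv.modify v [] (fun l => l ++ [hv.1])) inv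
        else inv) d).getD a []
      = d.getD a [] ++ (g.filter (fun hv => rank.contains hv.1 && decide (a ∈ pvHalfOdd hv.2))).map Prod.fst := by
  intro g
  induction g with
  | nil => intro d; simp
  | cons hv rest ih =>
    intro d
    simp only [List.foldl_cons]
    rw [ih]
    by_cases hr : rank.contains hv.1
    · rw [if_pos hr, pv_inv_inner _ d (PySem.List.nodup_dedup _) hv.1 a]
      by_cases hm : a ∈ pvHalfOdd hv.2
      · have : a ∈ PySem.List.dedup (pvHalfOdd hv.2) := (PySem.List.mem_dedup _ _).mpr hm
        simp [hr, hm]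
      · have : a ∉ PySem.List.dedup (pvHalfOdd hv.2) := fun hc => hm ((PySem.List.mem_dedup _ _).mp hc)
        simp [hr, hm]
    · simp [hr]

theorem pv_inv_getD (rank : PySem.Dict String Int) (g : List (String × List Int)) (a : Int) :
    (pvInv rank g).getD a []
      = (g.filter (fun hv => rank.contains hv.1 && decide (a ∈ pvHalfOdd hv.2))).map Prod.fst := by
  unfold pvInv
  rw [pv_inv_getD_aux]
  simp

theorem pv_inv_mem (rank : PySem.Dict String Int) (g : List (String × List Int)) (a : Int) (tags : String) :
    tags ∈ (pvInv rank g).getD a []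
      ↔ ∃ hv ∈ g, hv.1 = tags ∧ rank.contains hv.1 = true ∧ a ∈ pvHalfOdd hv.2 := by
  rw [pv_inv_getD]
  simp only [List.mem_map, List.mem_filter, Bool.and_eq_true, decide_eq_true_eq]
  constructor
  · rintro ⟨hv, ⟨hmem, hrk, hva⟩, heq⟩
    exact ⟨hv, hmem, heq, hrk, hva⟩
  · rintro ⟨hv, hmem, heq, hrk, hva⟩
    exact ⟨hv, ⟨hmem, hrk, hva⟩, heq⟩

theorem pv_inv_nodup (rank : PySem.Dict String Int) (g : List (String × List Int))
    (hg : (g.map Prod.fst).Nodup) (a : Int) : ((pvInv rank g).getD a []).Nodup := by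
  rw [pv_inv_getD]
  exact List.Nodup.sublist (List.Sublist.map Prod.fst List.filter_sublist) hg

-- ---- B: counting through the inverted index ----
theorem pv_count_flatMap (f : Int → List String) (t : String)
    (hf : ∀ a, (f a).count t = if t ∈ f a then 1 else 0) :
    ∀ keep : List Int, (keep.flatMap f).count t = keep.countP (fun a => decide (t ∈ f a)) := by
  intro keep
  induction keep with
  | nil => simp
  | cons a rest ih =>
    rw [List.flatMap_cons, List.count_append, List.countP_cons, hf a, ih]
    by_cases hm : t ∈ f a <;> simp [hm] <;> omega

-- ---- B: the sorted merge equals the order-scan ----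
theorem pv_merge_core (order : List String) (hnd : order.Nodup) (g : List (String × List Int))
    (hg : GraphOK g) (keep : List Int) (acc : PySem.Dict String Int) :
    pvMergeAcc (pvRank order) (pvLocal (pvInv (pvRank order) g) keep) acc
      = order.foldl (fun acc tags =>
          if (pvSset g).contains tags then
            let n : Int := keep.countP (fun a => decide (a ∈ (pvSset g).getD tags []))
            if n ≠ 0 then acc.insert tags (acc.getD tags 0 + n) else acc
          else acc) acc := by
  set rank := pvRank order with hrank
  set inv := pvInv rank g with hinv
  set L := keep.flatMap (fun a => inv.getD a []) with hL
  have hmemL : ∀ t, t ∈ L ↔ ∃ a ∈ keep, t ∈ inv.getD a [] := by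
    intro t; rw [hL, List.mem_flatMap]
  -- key facts about any tags in order
  have hfact : ∀ tags ∈ order,
      (tags ∈ (pvLocal inv keep).keys
        ↔ ((pvSset g).contains tags = true ∧ keep.countP (fun a => decide (a ∈ (pvSset g).getD tags [])) ≠ 0))
      ∧ ((pvSset g).contains tags = true →
          (pvLocal inv keep).getD tags 0
            = (keep.countP (fun a => decide (a ∈ (pvSset g).getD tags [])) : Int)) := by
    intro tags htags
    have hrk : rank.contains tags = true := by rw [hrank]; exact (pv_rank_contains order tags).mpr htags
    have hcount : L.count tags = keep.countP (fun a => decide (tags ∈ inv.getD a [])) := by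
      rw [hL]
      apply pv_count_flatMap
      intro a
      by_cases hm : tags ∈ inv.getD a []
      · rw [if_pos hm]; exact List.count_eq_one_of_mem (pv_inv_nodup rank g hg.1 a) hm
      · rw [if_neg hm]; exact List.count_eq_zero.mpr hm
    have hpt : ∀ a, tags ∈ inv.getD a [] ↔ ((pvSset g).contains tags = true ∧ a ∈ (pvSset g).getD tags []) := by
      intro a
      rw [hinv, pv_inv_mem]
      constructor
      · rintro ⟨hv, hmem, heq, _, hva⟩
        have hsc : (pvSset g).contains tags = true :=
          (pv_sset_contains g tags).mpr (heq ▸ List.mem_map_of_mem hmem)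
        have hsg : (pvSset g).getD tags [] = PySem.Set.ofList (pvHalfOdd hv.2) := by
          rw [← heq]; exact pv_getD_pairF g _ PySem.Dict.empty _ hg.1 hv hmem
        exact ⟨hsc, by rw [hsg]; exact (PySem.Set.mem_ofList _ _).mpr hva⟩
      · rintro ⟨hsc, hmem⟩
        obtain ⟨hv, hvm, hveq⟩ := List.mem_map.mp ((pv_sset_contains g tags).mp hsc)
        have hsg : (pvSset g).getD tags [] = PySem.Set.ofList (pvHalfOdd hv.2) := by
          rw [← hveq]; exact pv_getD_pairF g _ PySem.Dict.empty _ hg.1 hv hvm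
        refine ⟨hv, hvm, hveq, by rw [hveq]; exact hrk, ?_⟩
        rw [hsg] at hmem
        exact (PySem.Set.mem_ofList _ _).mp hmem
    have hcntP : keep.countP (fun a => decide (tags ∈ inv.getD a []))
        = if (pvSset g).contains tags = true then
            keep.countP (fun a => decide (a ∈ (pvSset g).getD tags [])) else 0 := by
      by_cases hsc : (pvSset g).contains tags = true
      · rw [if_pos hsc]
        apply List.countP_congr
        intro a _
        simp only [decide_eq_true_eq]
        rw [hpt a]
        simp [hsc]
      · rw [if_neg hsc, List.countP_eq_zero]
        intro a _
        simp only [decide_eq_true_eq]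
        rw [hpt a]
        tauto
    constructor
    · rw [pvLocal, PySem.Dict.keys_counter, PySem.Set.mem_ofList, hmemL]
      constructor
      · rintro ⟨a, ha, hm⟩
        have := (hpt a).mp hm
        refine ⟨this.1, ?_⟩
        have : 0 < keep.countP (fun a => decide (a ∈ (pvSset g).getD tags [])) :=
          List.countP_pos_iff.mpr ⟨a, ha, by simpa using this.2⟩
        omega
      · rintro ⟨hsc, hne⟩
        have : 0 < keep.countP (fun a => decide (a ∈ (pvSset g).getD tags [])) := by omega
        obtain ⟨a, ha, hp⟩ := List.countP_pos_iff.mp this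
        exact ⟨a, ha, (hpt a).mpr ⟨hsc, by simpa using hp⟩⟩
    · intro hsc
      rw [pvLocal, PySem.Dict.getD_counter, hcount, hcntP, if_pos hsc]
  -- the sorted key list is order filtered to local's keys
  have hkeysub : ∀ t ∈ (pvLocal inv keep).keys, t ∈ order := by
    intro t ht
    rw [pvLocal, PySem.Dict.keys_counter, PySem.Set.mem_ofList, hmemL] at ht
    obtain ⟨a, _, hm⟩ := ht
    rw [hinv, pv_inv_mem] at hm
    obtain ⟨hv, _, heq, hrk, _⟩ := hm
    rw [heq] at hrk
    rw [hrank] at hrk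
    exact (pv_rank_contains order t).mp hrk
  have hsorted : PySem.List.sorted (pvLocal inv keep).keys (fun t => rank.getD t 0)
      = order.filter (fun t => decide (t ∈ (pvLocal inv keep).keys)) := by
    apply PySem.List.sorted_eq_of_perm_of_pairwise_lt
    · rw [List.perm_ext_iff_of_nodup (List.Nodup.filter _ hnd) (by rw [pvLocal]; exact PySem.Dict.nodup_keys_counter _)]
      intro t
      rw [List.mem_filter]
      simp only [decide_eq_true_eq]
      constructor
      · exact fun h => h.2
      · exact fun h => ⟨hkeysub t h, h⟩
    · rw [hrank]
      exact List.Pairwise.filter _ (pv_rank_pairwise order hnd)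
  rw [pvMergeAcc, hsorted,
    ← PySem.List.foldl_ite_eq_foldl_filter (fun t => t ∈ (pvLocal inv keep).keys)
      (fun acc tags => acc.insert tags (acc.getD tags 0 + (pvLocal inv keep).getD tags 0)) order acc]
  apply PySem.List.foldl_congr_mem
  intro acc tags htags
  obtain ⟨hiff, hval⟩ := hfact tags htags
  by_cases hsc : (pvSset g).contains tags = true
  · by_cases hne : keep.countP (fun a => decide (a ∈ (pvSset g).getD tags [])) = 0
    · have : tags ∉ (pvLocal inv keep).keys := by rw [hiff]; tauto
      simp only [this, if_neg, not_false_iff, hsc, if_pos]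
      have : (keep.countP (fun a => decide (a ∈ (pvSset g).getD tags [])) : Int) = 0 := by
        exact_mod_cast hne
      simp [this]
    · have hin : tags ∈ (pvLocal inv keep).keys := hiff.mpr ⟨hsc, hne⟩
      have hne' : (keep.countP (fun a => decide (a ∈ (pvSset g).getD tags [])) : Int) ≠ 0 := by
        exact_mod_cast hne
      simp only [hin, if_pos, hsc, hne', ne_eq, not_false_iff]
      rw [hval hsc]
  · have : tags ∉ (pvLocal inv keep).keys := by rw [hiff]; tauto
    simp [this, hsc]

-- ---- B: linking a graph pair to pvFilt ----
theorem pv_filt_fold_get?_notmem : ∀ (g : List (String × List Int)) (d : PySem.Dict String (List Int))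
    (t : String), t ∉ g.map Prod.fst →
    (g.foldl (fun filt hv =>
        let keep := pvKeep hv.2
        if keep.isEmpty then filt else filt.insert hv.1 keep) d).get? t = d.get? t := by
  intro g
  induction g with
  | nil => intro d t _; rfl
  | cons hv rest ih =>
    intro d t ht
    simp only [List.map_cons, List.mem_cons, not_or] at ht
    simp only [List.foldl_cons]
    rw [ih _ _ ht.2]
    by_cases hk : (pvKeep hv.2).isEmpty
    · simp [hk]
    · simp only [hk, if_neg, Bool.false_eq_true, not_false_iff]
      exact PySem.Dict.get?_insert_of_ne _ _ ht.1

theorem pv_filt_get?_none (g : List (String × List Int)) (t : String) (ht : t ∉ g.map Prod.fst) :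
    (pvFilt g).get? t = none := by
  unfold pvFilt
  rw [pv_filt_fold_get?_notmem g PySem.Dict.empty t ht]
  rfl

theorem pv_filt_get?_aux : ∀ (g : List (String × List Int)) (d : PySem.Dict String (List Int)),
    (g.map Prod.fst).Nodup → (∀ hv ∈ g, d.contains hv.1 = false) →
    ∀ hv ∈ g,
    (g.foldl (fun filt hv =>
        let keep := pvKeep hv.2
        if keep.isEmpty then filt else filt.insert hv.1 keep) d).get? hv.1
      = if (pvKeep hv.2).isEmpty then none else some (pvKeep hv.2) := by
  intro g
  induction g with
  | nil => intro _ _ _ hv h; simp at h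
  | cons hw rest ih =>
    intro d hnd hc hv hm
    simp only [List.map_cons, List.nodup_cons] at hnd
    rcases List.mem_cons.mp hm with h | h
    · subst h
      simp only [List.foldl_cons]
      rw [pv_filt_fold_get?_notmem rest _ _ hnd.1]
      by_cases hk : (pvKeep hv.2).isEmpty
      · simp only [hk, if_pos]
        exact (PySem.Dict.get?_eq_none_iff_contains _ _).mpr (hc hv (List.mem_cons_self))
      · simp only [hk, if_neg, Bool.false_eq_true, not_false_iff]
        exact PySem.Dict.get?_insert_self _ _ _
    · simp only [List.foldl_cons]
      apply ih _ hnd.2 _ hv h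
      intro hw' hm'
      by_cases hk : (pvKeep hw.2).isEmpty
      · simp only [hk, if_pos]
        exact hc hw' (List.mem_cons_of_mem _ hm')
      · simp only [hk, if_neg, Bool.false_eq_true, not_false_iff]
        rw [PySem.Dict.contains_insert]
        have : hw'.1 ≠ hw.1 := by
          intro hh
          exact hnd.1 (hh ▸ List.mem_map_of_mem hm')
        simp [this, hc hw' (List.mem_cons_of_mem _ hm')]

theorem pv_filt_get?_mem (g : List (String × List Int)) (hnd : (g.map Prod.fst).Nodup)
    (hv : String × List Int) (hm : hv ∈ g) :
    (pvFilt g).get? hv.1 = if (pvKeep hv.2).isEmpty then none else some (pvKeep hv.2) :=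
  pv_filt_get?_aux g PySem.Dict.empty hnd (fun _ _ => by simp) hv hm

-- ---- B: one graph pair performs exactly pvVG ----
theorem pv_gpair_VG (order : List String) (hnd : order.Nodup) (g : List (String × List Int))
    (hg : GraphOK g) (hv : String × List Int) (hm : hv ∈ g) (acc : PySem.Dict String Int) :
    pvMergeAcc (pvRank order) (pvLocal (pvInv (pvRank order) g) (pvKeep hv.2)) acc
      = pvVG order g hv.1 acc := by
  unfold pvVG
  rw [pv_filt_get?_mem g hg.1 hv hm]
  by_cases hk : (pvKeep hv.2).isEmpty
  · rw [if_pos hk]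
    have hkeep : pvKeep hv.2 = [] := List.isEmpty_iff.mp hk
    have hkeys : (pvLocal (pvInv (pvRank order) g) (pvKeep hv.2)).keys = [] := by
      rw [hkeep, pvLocal]
      simp [PySem.Dict.keys_counter]
    rw [pvMergeAcc, hkeys]
    rw [(PySem.List.sorted_eq_nil_iff _ _ _).mpr rfl]
    rfl
  · rw [if_neg hk]
    exact pv_merge_core order hnd g hg (pvKeep hv.2) acc

-- ---- B: per-graph fold, keys and getD ----
theorem pv_gstep_keys (order : List String) (right : PySem.Dict String (PySem.Dict String Int))
    (g : List (String × List Int)) (h : ∀ t ∈ order, t ∈ right.keys) :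
    (pvGraphStep (pvRank order) right g).keys = right.keys := by
  unfold pvGraphStep
  refine pv_foldl_inv g _ (fun r => r.keys = right.keys) ?_ right rfl
  intro acc hv _ hacc
  unfold pvPairStep
  by_cases hr : (pvRank order).contains hv.1
  · rw [if_pos hr, PySem.Dict.keys_modify]
    have hmem : hv.1 ∈ acc.keys := by
      rw [hacc]
      exact h hv.1 ((pv_rank_contains order hv.1).mp hr)
    rw [PySem.Dict.keys_insert_of_contains _ _ ((PySem.Dict.contains_iff_mem_keys _ _).mpr hmem)]
    exact hacc
  · rw [if_neg hr]; exact hacc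

theorem pv_gstep_fold_notmem (order : List String) (inv : PySem.Dict Int (List String))
    (tup : String) : ∀ (g : List (String × List Int)) (right : PySem.Dict String (PySem.Dict String Int)),
    tup ∉ g.map Prod.fst →
    (g.foldl (pvPairStep (pvRank order) inv) right).getD tup PySem.Dict.empty
      = right.getD tup PySem.Dict.empty := by
  intro g
  induction g with
  | nil => intro right _; rfl
  | cons hv rest ih =>
    intro right ht
    simp only [List.map_cons, List.mem_cons, not_or] at ht
    simp only [List.foldl_cons]
    rw [ih _ ht.2]
    unfold pvPairStep
    by_cases hr : (pvRank order).contains hv.1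
    · rw [if_pos hr]
      exact PySem.Dict.getD_modify_of_ne _ _ _ ht.1
    · rw [if_neg hr]

theorem pv_gstep_getD (order : List String) (hnd : order.Nodup) (g : List (String × List Int))
    (hg : GraphOK g) (right : PySem.Dict String (PySem.Dict String Int)) (tup : String)
    (htup : tup ∈ order) :
    (pvGraphStep (pvRank order) right g).getD tup PySem.Dict.empty
      = pvVG order g tup (right.getD tup PySem.Dict.empty) := by
  unfold pvGraphStep
  by_cases hm : tup ∈ g.map Prod.fst
  · obtain ⟨hv, hvm, hveq⟩ := List.mem_map.mp hm
    subst hveq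
    obtain ⟨l1, l2, hgeq⟩ := List.append_of_mem hvm
    subst hgeq
    have hnd1 : hv.1 ∉ l1.map Prod.fst ∧ hv.1 ∉ l2.map Prod.fst := by
      have := hg.1
      simp only [List.map_append, List.map_cons, List.nodup_append, List.nodup_cons] at this
      constructor
      · intro hc
        exact this.2.2 hv.1 hc hv.1 List.mem_cons_self rfl
      · exact this.2.1.1
    have hr : (pvRank order).contains hv.1 = true := (pv_rank_contains order hv.1).mpr htup
    have hone : ∀ (r : PySem.Dict String (PySem.Dict String Int)),
        (pvPairStep (pvRank order) (pvInv (pvRank order) (l1 ++ hv :: l2)) r hv).getD hv.1 PySem.Dict.empty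
          = pvVG order (l1 ++ hv :: l2) hv.1 (r.getD hv.1 PySem.Dict.empty) := by
      intro r
      unfold pvPairStep
      rw [if_pos hr, PySem.Dict.getD_modify_self]
      exact pv_gpair_VG order hnd _ hg hv hvm _
    rw [List.foldl_append, List.foldl_cons]
    rw [pv_gstep_fold_notmem order _ hv.1 l2 _ hnd1.2, hone,
      pv_gstep_fold_notmem order _ hv.1 l1 right hnd1.1]
  · rw [pv_gstep_fold_notmem order _ tup g right hm]
    unfold pvVG
    rw [pv_filt_get?_none g tup hm]

-- ---- B: threading over the corpus ----
theorem pv_threadB (order : List String) (hnd : order.Nodup)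
    (all : List (List (String × List Int))) (hok : ∀ g ∈ all, GraphOK g) (tup : String)
    (htup : tup ∈ order) :
    ∀ (right : PySem.Dict String (PySem.Dict String Int)), (∀ t ∈ order, t ∈ right.keys) →
      (all.foldl (pvGraphStep (pvRank order)) right).getD tup PySem.Dict.empty
        = all.foldl (fun acc g => pvVG order g tup acc) (right.getD tup PySem.Dict.empty) := by
  induction all with
  | nil => intro right _; rfl
  | cons g rest ih =>
    intro right hk
    simp only [List.foldl_cons]
    rw [ih (fun g' hg' => hok g' (List.mem_cons_of_mem _ hg'))
      _ (fun t ht => by rw [pv_gstep_keys order right g hk]; exact hk t ht)]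
    rw [pv_gstep_getD order hnd g (hok g List.mem_cons_self) right tup htup]

theorem pv_threadB_keys (order : List String) (all : List (List (String × List Int))) :
    ∀ (right : PySem.Dict String (PySem.Dict String Int)), (∀ t ∈ order, t ∈ right.keys) →
    (all.foldl (pvGraphStep (pvRank order)) right).keys = right.keys := by
  induction all with
  | nil => intro right _; rfl
  | cons g rest ih =>
    intro right hk
    simp only [List.foldl_cons]
    rw [ih _ (fun t ht => by rw [pv_gstep_keys order right g hk]; exact hk t ht)]
    exact pv_gstep_keys order right g hk

-- ===== VERDICT (by name: the statement is the Claim_ definition above) =====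
theorem right_arc_spec : Claim_equal_right_arc := by
  intro all un_tag _hdom hpre
  unfold Spec_right_arc
  have hok : ∀ g ∈ all, GraphOK g := fun g hg => ⟨(hpre g hg).1, (hpre g hg).2⟩
  have hnd : (PySem.Set.ofList un_tag).Nodup := PySem.Set.nodup_ofList un_tag
  have hA : ∀ tup, ((all.map pvTempA).foldl
        (pvStep3 ((PySem.Set.ofList un_tag).map (fun t => (t, pvTagR all t))) tup)
        ((0 : Int), PySem.Dict.empty)).2
      = all.foldl (fun temp g => pvVG (PySem.Set.ofList un_tag) g tup temp) PySem.Dict.empty := by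
    intro tup
    have h := pv_threadA (PySem.Set.ofList un_tag) all tup all [] PySem.Dict.empty rfl hok
    simpa using h
  -- characterize A
  have hAchar : right_arc all un_tag
      = ((PySem.Set.ofList un_tag).map (fun tup =>
          (tup, (all.foldl (fun acc g => pvVG (PySem.Set.ofList un_tag) g tup acc)
            PySem.Dict.empty).items))) := by
    unfold right_arc
    simp only [PySem.List.foldl_append_singleton_eq_map, List.nil_append]
    rw [pv_insertF_items un_tag (pvTagR all) []]
    rw [pv_insertF_items un_tag (fun tup =>
      ((all.map pvTempA).foldl
        (pvStep3 ((PySem.Set.ofList un_tag).map (fun t => (t, pvTagR all t))) tup)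
        ((0 : Int), PySem.Dict.empty)).2) PySem.Dict.empty]
    rw [List.map_map]
    apply List.map_congr_left
    intro tup _
    simp only [Function.comp]
    rw [hA tup]
  -- characterize B
  have hk0 : ∀ t ∈ PySem.Set.ofList un_tag,
      t ∈ ((PySem.Set.ofList un_tag).foldl (fun d tup => d.insert tup PySem.Dict.empty)
        (PySem.Dict.empty : PySem.Dict String (PySem.Dict String Int))).keys := by
    intro t ht
    rw [pv_keys_foldl_insertF (PySem.Set.ofList un_tag) (fun _ => PySem.Dict.empty)]
    rw [PySem.Set.ofList_eq_self_of_nodup _ hnd]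
    exact ht
  have hBchar : right_arc_alt all un_tag
      = ((PySem.Set.ofList un_tag).map (fun tup =>
          (tup, (all.foldl (fun acc g => pvVG (PySem.Set.ofList un_tag) g tup acc)
            PySem.Dict.empty).items))) := by
    unfold right_arc_alt
    simp only [PySem.List.dedup_eq_ofList]
    have hkeys : (all.foldl (pvGraphStep (pvRank (PySem.Set.ofList un_tag)))
        ((PySem.Set.ofList un_tag).foldl (fun d tup => d.insert tup PySem.Dict.empty)
          PySem.Dict.empty)).keys = PySem.Set.ofList un_tag := by
      rw [pv_threadB_keys _ _ _ hk0]
      rw [pv_keys_foldl_insertF (PySem.Set.ofList un_tag) (fun _ => PySem.Dict.empty)]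
      exact PySem.Set.ofList_eq_self_of_nodup _ hnd
    rw [PySem.Dict.items_eq_map_keys _ (by rw [hkeys]; exact hnd) PySem.Dict.empty]
    rw [hkeys, List.map_map]
    apply List.map_congr_left
    intro tup htup
    simp only [Function.comp]
    rw [pv_threadB (PySem.Set.ofList un_tag) hnd all hok tup htup _ hk0]
    congr 1
    congr 1
    rw [pv_getD_foldl_insertF]
    split_ifs <;> rfl
  rw [hAchar, hBchar]
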